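-- pv_equiv track=rewrite | github.com/keninayoung/Voynich_Pipeline | archive/decode_voynich.py | smoothen
-- ===== SOURCE A (Python) =====
-- def smoothen(tokens):
--     out = []
--     for t in tokens:
--         out.append(t)
--         if t in {"quando","dare","aqua","oleum"}:
--             out.append("fac")
--         if t in {"vitalis","aqua","oleum"}:
--             out.append("usa")
--     return out
-- ===== SOURCE B (Python) =====
-- def _insert_after(toks, triggers, marker):
--     return [x for t in toks for x in ((t, marker) if t in triggers else (t,))]
--
-- def smoothen(tokens):
--     # Staged rewriting: first insert "usa" after its triggers, then "fac" after
--     # its triggers.  Running the "usa" pass first guarantees that a later "fac"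
--     # insertion after "aqua"/"oleum" lands between the token and its "usa",
--     # reproducing the fac-before-usa order.  Inserted markers ("usa") are never
--     # fac-triggers, so the second pass touches only original tokens.
--     mid = _insert_after(tokens, {"vitalis", "aqua", "oleum"}, "usa")
--     return _insert_after(mid, {"quando", "dare", "aqua", "oleum"}, "fac")
-- ===== Notes on version B (the rewrite author's own statement) =====
-- stated objective: alternative
-- what changed: A emits both markers per token in one loop with two conditionals; B is a staged rewriting pipeline of two independent insert-after passes (usa pass first, then fac pass over the intermediate stream), relying on inserted markers never being triggers.
import Mathlib
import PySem

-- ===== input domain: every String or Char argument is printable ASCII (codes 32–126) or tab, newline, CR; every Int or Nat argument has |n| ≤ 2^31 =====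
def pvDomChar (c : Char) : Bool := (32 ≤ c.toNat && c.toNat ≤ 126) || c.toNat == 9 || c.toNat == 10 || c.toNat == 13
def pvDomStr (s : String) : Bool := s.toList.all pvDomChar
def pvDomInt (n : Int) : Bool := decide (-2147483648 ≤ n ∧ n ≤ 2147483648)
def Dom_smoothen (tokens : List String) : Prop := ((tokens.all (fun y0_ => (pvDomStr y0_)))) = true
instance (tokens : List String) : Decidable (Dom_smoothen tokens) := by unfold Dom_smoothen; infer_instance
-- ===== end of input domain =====

-- B replaces A's single loop with two conditionals by a staged pipeline of two
-- independent insert-after passes (usa pass first, then fac pass); same cost.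

-- ===== PORT A =====
def smoothen (tokens : List String) : List String :=
  tokens.foldl (fun out t =>
    let out := out ++ [t]
    let out := if t = "quando" ∨ t = "dare" ∨ t = "aqua" ∨ t = "oleum" then out ++ ["fac"] else out
    if t = "vitalis" ∨ t = "aqua" ∨ t = "oleum" then out ++ ["usa"] else out) []

-- ===== PORT B =====
def insertAfter (toks : List String) (triggers : List String) (marker : String) : List String :=
  toks.flatMap (fun t => if t ∈ triggers then [t, marker] else [t])

def smoothen_alt (tokens : List String) : List String :=
  insertAfter (insertAfter tokens ["vitalis", "aqua", "oleum"] "usa")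
    ["quando", "dare", "aqua", "oleum"] "fac"

-- ===== PRECONDITION & SPEC =====
def Spec_smoothen (tokens : List String) (out : List String) : Prop := out = smoothen_alt tokens
instance (tokens : List String) (out : List String) : Decidable (Spec_smoothen tokens out) := by unfold Spec_smoothen; infer_instance

-- ===== CLAIM (what is proved, stated in full; the proofs are below) =====
def Claim_equal_smoothen : Prop := ∀ (tokens : List String), Dom_smoothen tokens → Spec_smoothen tokens (smoothen tokens)

-- ===== LEMMAS AND PROOFS =====

-- the per-token contribution shared by both programs
def smPiece (t : String) : List String :=
  (t :: (if t = "quando" ∨ t = "dare" ∨ t = "aqua" ∨ t = "oleum" then ["fac"] else [])) ++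
    (if t = "vitalis" ∨ t = "aqua" ∨ t = "oleum" then ["usa"] else [])

theorem smoothen_alt_eq_flatMap (tokens : List String) :
    smoothen_alt tokens = tokens.flatMap smPiece := by
  unfold smoothen_alt insertAfter
  induction tokens with
  | nil => rfl
  | cons t ts ih =>
    simp only [List.flatMap_cons, List.flatMap_append, ih, smPiece]
    congr 1
    by_cases h1 : t = "quando"
    · subst h1; decide
    by_cases h2 : t = "dare"
    · subst h2; decide
    by_cases h3 : t = "aqua"
    · subst h3; decide
    by_cases h4 : t = "oleum"
    · subst h4; decide
    by_cases h5 : t = "vitalis"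
    · subst h5; decide
    simp [h1, h2, h3, h4, h5]

theorem smoothen_foldl (tokens : List String) (acc : List String) :
    tokens.foldl (fun out t =>
      let out := out ++ [t]
      let out := if t = "quando" ∨ t = "dare" ∨ t = "aqua" ∨ t = "oleum" then out ++ ["fac"] else out
      if t = "vitalis" ∨ t = "aqua" ∨ t = "oleum" then out ++ ["usa"] else out) acc
    = acc ++ tokens.flatMap smPiece := by
  induction tokens generalizing acc with
  | nil => simp
  | cons t ts ih =>
    simp only [List.foldl_cons, ih, List.flatMap_cons, smPiece]
    split_ifs <;> simp

-- ===== VERDICT (by name: the statement is the Claim_ definition above) =====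
theorem smoothen_spec : Claim_equal_smoothen := by
  intro tokens _
  show smoothen tokens = smoothen_alt tokens
  unfold smoothen
  rw [smoothen_foldl, smoothen_alt_eq_flatMap]
  simp
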